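-- pv_equiv track=rewrite | github.com/hunseok329/programmers | 멀쩡한 사격형.py | solution
-- ===== SOURCE A (Python) =====
-- def solution(w, h):
--     number = max(w, h)
--     divisor = min(w, h)
--     while (number % divisor) != 0:
--         remainder = number % divisor
--         number = divisor
--         divisor = remainder
--     return (w*h) - (w+h-(divisor))
-- ===== SOURCE B (Python) =====
-- def _gcd(number, divisor):
--     remainder = number % divisor
--     if remainder == 0:
--         return divisor
--     return _gcd(divisor, remainder)
--
--
-- def solution(w, h):
--     return w * h - w - h + _gcd(max(w, h), min(w, h))
-- ===== Notes on version B (the rewrite author's own statement) =====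
-- stated objective: idiomatic
-- what changed: The stateful while-loop gcd is replaced by a recursive Euclidean helper and the final expression is flattened to a single arithmetic formula; Pre_ excludes min(w,h)==0, where both programs raise ZeroDivisionError on the first modulo.
import Mathlib
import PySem

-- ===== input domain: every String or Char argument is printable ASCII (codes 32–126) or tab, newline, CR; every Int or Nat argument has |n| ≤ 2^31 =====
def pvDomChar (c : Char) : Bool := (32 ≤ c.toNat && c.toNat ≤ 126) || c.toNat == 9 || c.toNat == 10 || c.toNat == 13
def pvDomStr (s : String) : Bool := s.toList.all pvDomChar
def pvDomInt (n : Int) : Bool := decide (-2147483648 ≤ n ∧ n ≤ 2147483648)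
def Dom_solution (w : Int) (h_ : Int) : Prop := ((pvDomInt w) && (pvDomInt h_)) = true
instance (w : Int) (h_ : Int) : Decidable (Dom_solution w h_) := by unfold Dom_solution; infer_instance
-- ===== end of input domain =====

-- B replaces A's stateful while-loop gcd by a recursive Euclidean helper and flattens the
-- final expression into one arithmetic formula; objective: idiomatic, same cost.


-- termination helper shared by both ports: |n % d| < |d| when d ≠ 0 (Python mod has the divisor's sign)
theorem pvModAbsLt (n d : Int) (hd : d ≠ 0) : (PySem.Int.mod n d).natAbs < d.natAbs := by
  rcases lt_or_gt_of_ne hd with h | h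
  · have := PySem.Int.mod_neg_bounds n h
    omega
  · have h1 := PySem.Int.mod_nonneg n h
    have h2 := PySem.Int.mod_lt n h
    omega

-- ===== PORT A =====
-- A's while-loop over state (number, divisor); the 'divisor = 0' branch is where Python raises
-- ZeroDivisionError (excluded by Pre_solution) and only makes the recursion total
def solutionLoop (number divisor : Int) : Int :=
  if _hd : divisor = 0 then 0
  else if PySem.Int.mod number divisor ≠ 0 then
    let remainder := PySem.Int.mod number divisor
    solutionLoop divisor remainder
  else divisor
termination_by divisor.natAbs
decreasing_by exact pvModAbsLt number divisor _hd

def solution (w : Int) (h_ : Int) : Int :=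
  let number := max w h_
  let divisor := min w h_
  let divisor := solutionLoop number divisor
  (w * h_) - (w + h_ - divisor)

-- ===== PORT B =====
-- recursive Euclidean gcd; the 'divisor = 0' branch is where Python raises ZeroDivisionError
-- (excluded by Pre_solution) and only makes the recursion total
def pyGcd (number divisor : Int) : Int :=
  if _hd : divisor = 0 then 0
  else
    let remainder := PySem.Int.mod number divisor
    if remainder = 0 then divisor
    else pyGcd divisor remainder
termination_by divisor.natAbs
decreasing_by exact pvModAbsLt number divisor _hd

def solution_alt (w : Int) (h_ : Int) : Int :=
  w * h_ - w - h_ + pyGcd (max w h_) (min w h_)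

-- ===== PRECONDITION & SPEC =====
-- Pre_ excludes exactly min(w,h) = 0, where the first '%' of BOTH programs raises ZeroDivisionError
def Pre_solution (w : Int) (h_ : Int) : Prop := min w h_ ≠ 0
instance (w : Int) (h_ : Int) : Decidable (Pre_solution w h_) := by unfold Pre_solution; infer_instance
def pvWitness_solution : Int × Int := (12, 8)

def Spec_solution (w : Int) (h_ : Int) (out : Int) : Prop := out = solution_alt w h_
instance (w : Int) (h_ : Int) (out : Int) : Decidable (Spec_solution w h_ out) := by unfold Spec_solution; infer_instance

-- ===== CLAIM (what is proved, stated in full; the proofs are below) =====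
def Claim_equal_solution : Prop := ∀ (w : Int) (h_ : Int), Dom_solution w h_ → Pre_solution w h_ → Spec_solution w h_ (solution w h_)

-- ===== LEMMAS AND PROOFS =====
theorem solutionLoop_eq_pyGcd (number divisor : Int) : solutionLoop number divisor = pyGcd number divisor := by
  induction number, divisor using solutionLoop.induct with
  | case1 n => simp [solutionLoop, pyGcd]
  | case2 n d hd hr r ih =>
    rw [solutionLoop, pyGcd]
    simp only [hd, dite_false]
    rw [if_pos hr, if_neg hr]
    simpa [r] using ih
  | case3 n d hd hr =>
    rw [solutionLoop, pyGcd]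
    simp only [hd, dite_false]
    rw [if_neg (by simpa using hr), if_pos (by simpa using hr)]

-- ===== VERDICT (by name: the statement is the Claim_ definition above) =====
theorem solution_spec : Claim_equal_solution := by
  intro w h_ _ _
  show (w * h_) - (w + h_ - solutionLoop (max w h_) (min w h_)) = solution_alt w h_
  unfold solution_alt
  rw [solutionLoop_eq_pyGcd]
  ring
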